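-- pv_equiv track=rewrite | github.com/mmm12344/Python-to-vhdl-converter | PythonToVhdlConverter/logic_converter.py | get_logic
-- ===== SOURCE A (Python) =====
-- def find_leading_white_space(line):
--     """
--     Calculates number of leading white space.
--
--     Args:
--         line(str): The line.
--
--     Returns:
--         int: The number of leading white space.
--     """
--     return len(line) - len(line.lstrip())
--
-- def process_lines(lines):
--     processed_lines = []
--     for line in lines:
--         processed_lines.append(line.rstrip())
--     return processed_lines
--
-- def get_logic(lines):
--     logic_lines = []
--     logic_index = lines.index("@logic\n")
--     lines = process_lines(lines[logic_index+2:])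
--     for line in lines:
--         if find_leading_white_space(line) < 2 and line.rstrip() != "":
--             break
--         if line.rstrip() != "":
--             logic_lines.append(line)
--     return logic_lines
-- ===== SOURCE B (Python) =====
-- def get_logic(lines):
--     tail = [l.rstrip() for l in lines[lines.index("@logic\n") + 2:]]
--     def in_block(i):
--         # a line belongs to the block iff every line up to and including it
--         # is empty or indented by at least 2 (tabs or spaces)
--         return all(t == "" or len(t) - len(t.lstrip()) >= 2 for t in tail[:i + 1])
--     return [l for i, l in enumerate(tail) if l != "" and in_block(i)]
-- ===== Notes on version B (the rewrite author's own statement) =====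
-- stated objective: alternative
-- what changed: A's single sequential break-loop with an accumulator is replaced by a non-sequential membership characterization: a line is kept iff it is non-empty and every line up to and including it is empty or indented by at least 2 (a per-line all() prefix test over enumerate), with no break, no cut index and no accumulator.
import Mathlib
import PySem

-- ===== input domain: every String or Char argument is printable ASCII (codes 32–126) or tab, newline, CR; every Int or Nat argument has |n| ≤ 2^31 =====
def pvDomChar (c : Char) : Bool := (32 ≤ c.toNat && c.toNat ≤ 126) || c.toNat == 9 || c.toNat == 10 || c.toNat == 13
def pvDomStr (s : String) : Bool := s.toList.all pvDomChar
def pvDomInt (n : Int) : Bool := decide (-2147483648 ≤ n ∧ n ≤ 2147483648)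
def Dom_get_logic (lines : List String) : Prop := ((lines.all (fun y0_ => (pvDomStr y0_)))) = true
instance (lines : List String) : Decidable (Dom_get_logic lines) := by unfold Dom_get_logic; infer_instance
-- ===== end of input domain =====

-- B replaces A's single interleaved break-loop by a membership characterization: a line is kept
-- iff it is non-empty and every line up to and including it is empty or indented >= 2 (a per-line
-- prefix test via enumerate), with no break and no cut index (objective: alternative, O(n^2) vs O(n)).


-- ===== PORT A =====
def find_leading_white_space (line : String) : Int :=
  PySem.Str.len line - PySem.Str.len (PySem.Str.lstrip line)

def process_lines (lines : List String) : List String :=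
  lines.foldl (fun acc line => acc ++ [PySem.Str.rstrip line]) []

-- A's for-loop with break, as structural recursion over the same state
def getLogicLoop (acc : List String) : List String → List String
  | [] => acc
  | line :: rest =>
    if find_leading_white_space line < 2 ∧ PySem.Str.rstrip line ≠ "" then acc
    else getLogicLoop (if PySem.Str.rstrip line ≠ "" then acc ++ [line] else acc) rest

def get_logic (lines : List String) : List String :=
  match PySem.List.index? lines "@logic\n" with
  | none => []   -- Python raises ValueError here; excluded by Pre_get_logic
  | some idx =>
    getLogicLoop [] (process_lines (PySem.List.slice lines (some ((idx + 2 : Nat) : Int)) none))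

-- ===== PORT B =====
def get_logic_alt (lines : List String) : List String :=
  match PySem.List.index? lines "@logic\n" with
  | none => []   -- Python raises ValueError here; excluded by Pre_get_logic
  | some idx =>
    let tail := (PySem.List.slice lines (some ((idx + 2 : Nat) : Int)) none).map PySem.Str.rstrip
    let in_block : Int → Bool := fun i =>
      (PySem.List.slice tail none (some (i + 1))).all
        (fun t => decide (t = "") || decide (2 ≤ PySem.Str.len t - PySem.Str.len (PySem.Str.lstrip t)))
    (PySem.List.enumerate tail 0).filterMap
      (fun p => if p.2 ≠ "" ∧ in_block p.1 then some p.2 else none)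

-- ===== PRECONDITION & SPEC =====
-- Pre_ excludes exactly the inputs where lines.index("@logic\n") raises ValueError.
def Pre_get_logic (lines : List String) : Prop := "@logic\n" ∈ lines
instance (lines : List String) : Decidable (Pre_get_logic lines) := by unfold Pre_get_logic; infer_instance
def pvWitness_get_logic : List String := ["@logic\n", "x\n", "  a\n", "", "  b\n", "end\n"]

def Spec_get_logic (lines : List String) (out : List String) : Prop := out = get_logic_alt lines
instance (lines : List String) (out : List String) : Decidable (Spec_get_logic lines out) := by unfold Spec_get_logic; infer_instance

-- ===== CLAIM (what is proved, stated in full; the proofs are below) =====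
def Claim_equal_get_logic : Prop := ∀ (lines : List String), Dom_get_logic lines → Pre_get_logic lines → Spec_get_logic lines (get_logic lines)

-- ===== LEMMAS AND PROOFS =====

-- the per-line "may belong to the block" test, as B computes it
def lineOk (t : String) : Bool :=
  decide (t = "") || decide (2 ≤ PySem.Str.len t - PySem.Str.len (PySem.Str.lstrip t))

-- B's selection on a list ts (the body of get_logic_alt after the slice/rstrip pass)
def bSel (ts : List String) : List String :=
  (PySem.List.enumerate ts 0).filterMap
    (fun p => if p.2 ≠ "" ∧ (PySem.List.slice ts none (some (p.1 + 1))).all lineOk then some p.2 else none)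

theorem rstrip_idem (s : String) :
    PySem.Str.rstrip (PySem.Str.rstrip s) = PySem.Str.rstrip s := by
  simp [PySem.Str.rstrip, PySem.Chars.rstrip, List.dropWhile_idempotent]

theorem process_lines_eq_map (ls : List String) (acc : List String) :
    ls.foldl (fun acc line => acc ++ [PySem.Str.rstrip line]) acc = acc ++ ls.map PySem.Str.rstrip := by
  induction ls generalizing acc with
  | nil => simp
  | cons l ls ih => simp [List.foldl_cons, ih]

-- generic index-shift lemma for filterMap over enumerate
theorem filterMap_enumerate_shift {α β : Type} (ls : List α) (f g : Int × α → Option β)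
    (s t : Int) (h : ∀ (k : Nat) (x : α), f (s + k, x) = g (t + k, x)) :
    (PySem.List.enumerate ls s).filterMap f = (PySem.List.enumerate ls t).filterMap g := by
  induction ls generalizing s t with
  | nil => simp [PySem.List.enumerate_nil]
  | cons l ls ih =>
    have h0 : f (s, l) = g (t, l) := by simpa using h 0 l
    have hrest : (PySem.List.enumerate ls (s + 1)).filterMap f
        = (PySem.List.enumerate ls (t + 1)).filterMap g := by
      apply ih
      intro k x
      have := h (k + 1) x
      push_cast at this ⊢
      convert this using 3 <;> ring
    rw [PySem.List.enumerate_cons, PySem.List.enumerate_cons, List.filterMap_cons,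
      List.filterMap_cons, h0, hrest]

theorem slice_take_cons (l : String) (ls : List String) (k : Nat) :
    PySem.List.slice (l :: ls) none (some ((1 : Int) + (k : Nat) + 1))
      = l :: PySem.List.slice ls none (some ((0 : Int) + (k : Nat) + 1)) := by
  have h1 : ((1 : Int) + (k : Nat) + 1) = (((k + 2 : Nat) : Int)) := by push_cast; ring
  have h2 : ((0 : Int) + (k : Nat) + 1) = (((k + 1 : Nat) : Int)) := by push_cast; ring
  rw [h1, h2, PySem.List.slice_to_natCast, PySem.List.slice_to_natCast]
  simp [List.take_succ_cons]

theorem bSel_cons (l : String) (ls : List String) :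
    bSel (l :: ls) = if lineOk l then (if l ≠ "" then [l] else []) ++ bSel ls else [] := by
  unfold bSel
  rw [PySem.List.enumerate_cons, List.filterMap_cons]
  have h0 : PySem.List.slice (l :: ls) none (some ((0 : Int) + 1)) = [l] := by
    have : ((0 : Int) + 1) = (((1 : Nat) : Int)) := by norm_num
    rw [this, PySem.List.slice_to_natCast]; simp
  have hshift : (PySem.List.enumerate ls (0 + 1)).filterMap
      (fun p => if p.2 ≠ "" ∧ (PySem.List.slice (l :: ls) none (some (p.1 + 1))).all lineOk then some p.2 else none)
      = (PySem.List.enumerate ls 0).filterMap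
      (fun p => if p.2 ≠ "" ∧ (lineOk l && (PySem.List.slice ls none (some (p.1 + 1))).all lineOk) = true then some p.2 else none) := by
    apply filterMap_enumerate_shift
    intro k x
    rw [show ((0 : Int) + 1 + (k : Nat)) + 1 = ((1 : Int) + (k : Nat) + 1) by ring,
        slice_take_cons]
    simp [List.all_cons]
  by_cases hok : lineOk l = true
  · by_cases hl : l = ""
    · subst hl
      simp only [h0, hshift, List.all_cons]
      simp [hok]
    · simp only [h0, hshift, List.all_cons]
      simp [hok, hl]
  · have hok' : lineOk l = false := by simpa using hok
    simp only [h0, hshift, List.all_cons]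
    simp [hok']

theorem getLogicLoop_eq (ts : List String) (h : ∀ l ∈ ts, PySem.Str.rstrip l = l) (acc : List String) :
    getLogicLoop acc ts = acc ++ bSel ts := by
  induction ts generalizing acc with
  | nil => simp [getLogicLoop, bSel, PySem.List.enumerate_nil]
  | cons l ls ih =>
    have hl : PySem.Str.rstrip l = l := h l (List.mem_cons_self ..)
    have hls : ∀ x ∈ ls, PySem.Str.rstrip x = x := fun x hx => h x (List.mem_cons_of_mem _ hx)
    rw [bSel_cons]
    by_cases hok : lineOk l = true
    · have hA : ¬ (find_leading_white_space l < 2 ∧ PySem.Str.rstrip l ≠ "") := by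
        rw [hl]
        unfold lineOk at hok
        unfold find_leading_white_space
        rintro ⟨hlt, hne⟩
        rcases Bool.or_eq_true .. |>.mp hok with h1 | h1
        · exact hne (of_decide_eq_true h1)
        · have := of_decide_eq_true h1; omega
      rw [getLogicLoop, if_neg hA, ih hls, hl, if_pos hok]
      by_cases hl0 : l = "" <;> simp [hl0, List.append_assoc]
    · have hok' : lineOk l = false := by simpa using hok
      unfold lineOk at hok'
      have hne : l ≠ "" := by
        intro hc; rw [hc] at hok'; simp at hok'
      have hlt : find_leading_white_space l < 2 := by
        unfold find_leading_white_space
        rcases Bool.or_eq_false_iff.mp hok' with ⟨_, h2⟩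
        have := of_decide_eq_false h2
        omega
      rw [getLogicLoop, if_pos ⟨hlt, by rw [hl]; exact hne⟩, if_neg hok]
      simp

-- ===== VERDICT (by name: the statement is the Claim_ definition above) =====
theorem get_logic_spec : Claim_equal_get_logic := by
  intro lines _ hpre
  unfold Spec_get_logic get_logic get_logic_alt
  cases hfind : PySem.List.index? lines "@logic\n" with
  | none => rfl
  | some idx =>
    have hh : ∀ l ∈ (PySem.List.slice lines (some ((idx + 2 : Nat) : Int)) none).map PySem.Str.rstrip,
        PySem.Str.rstrip l = l := by
      intro l hlmem
      rcases List.mem_map.mp hlmem with ⟨x, _, rfl⟩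
      exact rstrip_idem x
    simp only
    rw [process_lines, process_lines_eq_map, List.nil_append, getLogicLoop_eq _ hh]
    rfl
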